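-- pv_equiv track=rewrite | github.com/hoanhsang1/100baitapPython | BTXL_List/B64.py | chan_le
-- ===== SOURCE A (Python) =====
-- def chan_le(List):
-- 	sai = 'đây k phải là list chẵn lẽ'
-- 	dung = 'đây là list chẵn lẽ'
-- 	for i in range(len(List)):
-- 		for y in range(i+1,len(List)):
-- 			a = List[i]+List[y]
-- 			if a%2==0:
-- 				return sai
-- 	return dung
-- ===== SOURCE B (Python) =====
-- def chan_le(List):
--     sai = 'đây k phải là list chẵn lẽ'
--     dung = 'đây là list chẵn lẽ'
--     evens = 0
--     odds = 0
--     for x in List: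
--         if x % 2 == 0:
--             evens += 1
--         else:
--             odds += 1
--     if evens >= 2 or odds >= 2:
--         return sai
--     return dung
-- ===== Notes on version B (the rewrite author's own statement) =====
-- stated objective: alternative
-- what changed: Replaced the nested all-pairs scan for a pair summing to even with a single pass counting parities, answering sai iff there are at least two evens or at least two odds (a pair sums to even iff two elements share a parity).
import Mathlib
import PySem

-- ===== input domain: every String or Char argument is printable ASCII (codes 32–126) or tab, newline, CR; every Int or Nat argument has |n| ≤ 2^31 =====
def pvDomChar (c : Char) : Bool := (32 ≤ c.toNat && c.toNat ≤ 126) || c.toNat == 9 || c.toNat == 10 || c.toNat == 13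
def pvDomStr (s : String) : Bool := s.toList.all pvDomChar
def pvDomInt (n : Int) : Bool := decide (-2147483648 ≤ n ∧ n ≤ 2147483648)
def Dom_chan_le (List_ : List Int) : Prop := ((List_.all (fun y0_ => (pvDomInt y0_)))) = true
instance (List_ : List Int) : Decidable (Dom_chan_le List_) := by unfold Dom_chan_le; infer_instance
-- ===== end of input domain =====

-- B replaces A's all-pairs scan by one pass counting evens and odds (a pair sums to
-- even iff two elements share a parity); a different algorithm, not measured faster
-- (A early-exits at the first same-parity pair).

-- ===== PORT A =====
-- inner loop 'for y in range(i+1, len(List)): a = List[i]+List[y]; if a%2==0: return sai'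
-- (indices drawn from range(len) are always in bounds, so pyGetD's default 0 is never used)
def chanLeInner (L : List Int) (i : Int) (ys : List Int) : Bool :=
  match ys with
  | [] => false
  | y :: rest =>
      let a := PySem.List.pyGetD L i 0 + PySem.List.pyGetD L y 0
      if PySem.Int.mod a 2 == 0 then true else chanLeInner L i rest

-- outer loop 'for i in range(len(List)): …'
def chanLeOuter (L : List Int) (is_ : List Int) : Bool :=
  match is_ with
  | [] => false
  | i :: rest =>
      if chanLeInner L i (PySem.List.pyRange (i + 1) L.length 1) then true
      else chanLeOuter L rest

def chan_le (List_ : List Int) : String :=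
  let sai := "đây k phải là list chẵn lẽ"
  let dung := "đây là list chẵn lẽ"
  if chanLeOuter List_ (PySem.List.pyRange 0 List_.length 1) then sai else dung

-- ===== PORT B =====
-- one pass over the list maintaining the two counters (evens, odds)
def chan_le_alt (List_ : List Int) : String :=
  let sai := "đây k phải là list chẵn lẽ"
  let dung := "đây là list chẵn lẽ"
  let p : Int × Int :=
    List_.foldl
      (fun (p : Int × Int) x =>
        if PySem.Int.mod x 2 == 0 then (p.1 + 1, p.2) else (p.1, p.2 + 1))
      (0, 0)
  if 2 ≤ p.1 ∨ 2 ≤ p.2 then sai else dung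

-- ===== PRECONDITION & SPEC =====
def Spec_chan_le (List_ : List Int) (out : String) : Prop := out = chan_le_alt List_
instance (List_ : List Int) (out : String) : Decidable (Spec_chan_le List_ out) := by unfold Spec_chan_le; infer_instance

-- ===== CLAIM (what is proved, stated in full; the proofs are below) =====
def Claim_equal_chan_le : Prop := ∀ (List_ : List Int), Dom_chan_le List_ → Spec_chan_le List_ (chan_le List_)

-- ===== LEMMAS AND PROOFS =====

-- the parity predicate both programs compare against
def pvEven (x : Int) : Bool := PySem.Int.mod x 2 == 0

-- A's algorithm as structural recursion on the suffix of the list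
def bruteAux (L : List Int) : Bool :=
  match L with
  | [] => false
  | x :: rest => rest.any (fun y => PySem.Int.mod (x + y) 2 == 0) || bruteAux rest

theorem chanLeInner_eq_any (L : List Int) (i : Int) (ys : List Int) :
    chanLeInner L i ys
      = ys.any (fun y => PySem.Int.mod (PySem.List.pyGetD L i 0 + PySem.List.pyGetD L y 0) 2 == 0) := by
  induction ys with
  | nil => rfl
  | cons y rest ih =>
      show (if (PySem.Int.mod (PySem.List.pyGetD L i 0 + PySem.List.pyGetD L y 0) 2 == 0) = true
            then true else chanLeInner L i rest) = _
      rw [List.any_cons, ← ih]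
      cases hc : (PySem.Int.mod (PySem.List.pyGetD L i 0 + PySem.List.pyGetD L y 0) 2 == 0) <;>
        simp only [Bool.false_or, Bool.true_or, Bool.false_eq_true, reduceIte]

theorem chanLeInner_range (L : List Int) (i : Int) (j : Nat) :
    chanLeInner L i (PySem.List.pyRange (j : Int) L.length 1)
      = (L.drop j).any (fun y => PySem.Int.mod (PySem.List.pyGetD L i 0 + y) 2 == 0) := by
  rw [chanLeInner_eq_any]
  have h := PySem.List.map_pyGetD_pyRange (xs := L) (a := (j : Int)) (d := 0) (by positivity)
  simp only [Int.toNat_natCast, PySem.List.len_eq] at h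
  rw [← h, List.any_map]
  rfl

theorem chanLeOuter_range (L : List Int) :
    ∀ (n k : Nat), L.length - k = n →
      chanLeOuter L (PySem.List.pyRange (k : Int) L.length 1) = bruteAux (L.drop k) := by
  intro n
  induction n with
  | zero =>
      intro k hk
      have hle : L.length ≤ k := by omega
      rw [PySem.List.pyRange_one_eq_nil (by exact_mod_cast hle)]
      rw [List.drop_of_length_le hle]
      rfl
  | succ n ih =>
      intro k hk
      have hlt : k < L.length := by omega
      rw [PySem.List.pyRange_one_cons (by exact_mod_cast hlt)]
      have hdrop : L.drop k = L[k] :: L.drop (k + 1) := List.drop_eq_getElem_cons hlt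
      have hcast : ((k : Int) + 1) = ((k + 1 : Nat) : Int) := by push_cast; ring
      show (if chanLeInner L (k : Int) (PySem.List.pyRange ((k : Int) + 1) L.length 1) then true
            else chanLeOuter L (PySem.List.pyRange ((k : Int) + 1) L.length 1)) = _
      rw [hcast, chanLeInner_range L (k : Int) (k + 1), ih (k + 1) (by omega)]
      rw [hdrop]
      show _ = ((L.drop (k + 1)).any (fun y => PySem.Int.mod (L[k] + y) 2 == 0) || bruteAux (L.drop (k + 1)))
      have hget : PySem.List.pyGetD L (k : Int) 0 = L[k] := by
        rw [PySem.List.pyGetD_natCast]; exact List.getD_eq_getElem L 0 hlt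
      rw [hget]
      cases hX : (L.drop (k + 1)).any (fun y => PySem.Int.mod (L[k] + y) 2 == 0) <;>
        simp only [Bool.true_or, Bool.false_or, Bool.false_eq_true, reduceIte]

-- parity arithmetic: x+y sums to even iff x and y have the same parity
theorem mod_add_two_eq_zero (x y : Int) :
    (PySem.Int.mod (x + y) 2 == 0) = (pvEven x == pvEven y) := by
  simp only [pvEven, PySem.Int.mod_eq_emod_of_pos (a := x + y) (b := 2) (by norm_num),
    PySem.Int.mod_eq_emod_of_pos (a := x) (b := 2) (by norm_num),
    PySem.Int.mod_eq_emod_of_pos (a := y) (b := 2) (by norm_num)]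
  by_cases hx : x % 2 = 0 <;> by_cases hy : y % 2 = 0 <;>
    simp [hx, hy] <;> omega

theorem bruteAux_counts (L : List Int) :
    bruteAux L = true ↔ 2 ≤ L.countP pvEven ∨ 2 ≤ L.countP (fun x => !pvEven x) := by
  induction L with
  | nil => simp [bruteAux]
  | cons x rest ih =>
      have hany : (rest.any (fun y => PySem.Int.mod (x + y) 2 == 0) = true)
          ↔ 0 < rest.countP (fun y => pvEven x == pvEven y) := by
        rw [List.countP_pos_iff]
        simp only [List.any_eq_true, mod_add_two_eq_zero]
      simp only [bruteAux, Bool.or_eq_true, ih, hany, List.countP_cons]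
      cases hx : pvEven x
      · have h1 : rest.countP (fun y => false == pvEven y)
            = rest.countP (fun y => !pvEven y) := by
          apply List.countP_congr; intro y _; cases pvEven y <;> simp
        rw [h1]
        simp only [Bool.not_false, Bool.false_eq_true, reduceIte]
        omega
      · have h1 : rest.countP (fun y => true == pvEven y) = rest.countP pvEven := by
          apply List.countP_congr; intro y _; cases pvEven y <;> simp
        rw [h1]
        simp only [Bool.not_true, Bool.false_eq_true, reduceIte]
        omega

theorem foldl_counts (L : List Int) : ∀ (a b : Int),
    L.foldl (fun (p : Int × Int) x =>
        if PySem.Int.mod x 2 == 0 then (p.1 + 1, p.2) else (p.1, p.2 + 1)) (a, b)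
      = (a + (L.countP pvEven : Int), b + (L.countP (fun x => !pvEven x) : Int)) := by
  induction L with
  | nil => intro a b; simp
  | cons x rest ih =>
      intro a b
      simp only [List.foldl_cons, List.countP_cons]
      cases hx : PySem.Int.mod x 2 == 0
      · have hxe : pvEven x = false := hx
        simp only [hxe, Bool.not_false, Bool.false_eq_true, reduceIte, ih, Prod.mk.injEq]
        constructor <;> push_cast <;> ring
      · have hxe : pvEven x = true := hx
        simp only [hxe, Bool.not_true, Bool.false_eq_true, reduceIte, ih, Prod.mk.injEq]
        constructor <;> push_cast <;> ring

-- bridge between a Bool-conditioned if and a Prop-conditioned if with equivalent conditions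
theorem pv_if_congr (b : Bool) (P : Prop) [Decidable P] (h : b = true ↔ P) (s d : String) :
    (if b then s else d) = (if P then s else d) := by
  by_cases hb : b = true
  · rw [if_pos hb, if_pos (h.mp hb)]
  · rw [if_neg hb, if_neg (fun hp => hb (h.mpr hp))]

-- ===== VERDICT (by name: the statement is the Claim_ definition above) =====
theorem chan_le_spec : Claim_equal_chan_le := by
  intro L _
  show chan_le L = chan_le_alt L
  have hA : chanLeOuter L (PySem.List.pyRange 0 (L.length : Int) 1) = bruteAux L := by
    simpa using chanLeOuter_range L (L.length - 0) 0 rfl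
  show (if chanLeOuter L (PySem.List.pyRange 0 (L.length : Int) 1)
          then "đây k phải là list chẵn lẽ" else "đây là list chẵn lẽ")
      = (if 2 ≤ (L.foldl (fun (p : Int × Int) x =>
              if PySem.Int.mod x 2 == 0 then (p.1 + 1, p.2) else (p.1, p.2 + 1)) (0, 0)).1
            ∨ 2 ≤ (L.foldl (fun (p : Int × Int) x =>
              if PySem.Int.mod x 2 == 0 then (p.1 + 1, p.2) else (p.1, p.2 + 1)) (0, 0)).2
          then "đây k phải là list chẵn lẽ" else "đây là list chẵn lẽ")
  rw [hA, foldl_counts L 0 0]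
  refine pv_if_congr _ _ ?_ _ _
  rw [bruteAux_counts]
  omega
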